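-- pv_equiv track=rewrite | github.com/Tulpana/ARC-AGI-2 | arc_agi_2_submission/predict_competition.py | _fit_to_shape
-- ===== SOURCE A (Python) =====
-- from collections import Counter, deque
--
-- def _is_rectangular_grid(grid) -> bool:
--     if not isinstance(grid, list) or not grid:
--         return False
--     first = grid[0]
--     if not isinstance(first, list):
--         return False
--     width = len(first)
--     if width == 0:
--         return False
--     for row in grid:
--         if not isinstance(row, list) or len(row) != width:
--             return False
--     return True
--
-- def _mode_color(grid):
--     freq: Counter[int] = Counter()
--     for row in grid or []:
--         for cell in row:
--             try:
--                 freq.update([int(cell)])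
--             except Exception:
--                 continue
--     return freq.most_common(1)[0][0] if freq else 0
--
-- def _fit_to_shape(grid, expected_shape):
--     if not expected_shape:
--         return grid
--     th, tw = expected_shape
--     if th <= 0 or tw <= 0 or not _is_rectangular_grid(grid):
--         return grid
--     gh, gw = len(grid), len(grid[0])
--     if gh == th and gw == tw:
--         return grid
--     bg = _mode_color(grid)
--     resized = [[bg for _ in range(tw)] for _ in range(th)]
--     for r in range(th):
--         for c in range(tw):
--             resized[r][c] = grid[r % gh][c % gw]
--     return resized
-- ===== SOURCE B (Python) =====
-- def _fit_to_shape(grid, expected_shape):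
--     if not expected_shape:
--         return grid
--     th, tw = expected_shape
--     if th <= 0 or tw <= 0:
--         return grid
--     if not isinstance(grid, list) or not grid or not isinstance(grid[0], list):
--         return grid
--     gw = len(grid[0])
--     if gw == 0 or any(not isinstance(row, list) or len(row) != gw for row in grid):
--         return grid
--     gh = len(grid)
--     if gh == th and gw == tw:
--         return grid
--     reps = -(-tw // gw)
--     return [(grid[r % gh] * reps)[:tw] for r in range(th)]
-- ===== Notes on version B (the rewrite author's own statement) =====
-- stated objective: simpler
-- what changed: B drops A's dead mode-color background pre-fill and cell-by-cell double loop with in-place assignment, and instead builds each output row directly by list repetition and truncation ((grid[r % gh] * ceil(tw/gw))[:tw]) in a single loop over target rows.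
import Mathlib
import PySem

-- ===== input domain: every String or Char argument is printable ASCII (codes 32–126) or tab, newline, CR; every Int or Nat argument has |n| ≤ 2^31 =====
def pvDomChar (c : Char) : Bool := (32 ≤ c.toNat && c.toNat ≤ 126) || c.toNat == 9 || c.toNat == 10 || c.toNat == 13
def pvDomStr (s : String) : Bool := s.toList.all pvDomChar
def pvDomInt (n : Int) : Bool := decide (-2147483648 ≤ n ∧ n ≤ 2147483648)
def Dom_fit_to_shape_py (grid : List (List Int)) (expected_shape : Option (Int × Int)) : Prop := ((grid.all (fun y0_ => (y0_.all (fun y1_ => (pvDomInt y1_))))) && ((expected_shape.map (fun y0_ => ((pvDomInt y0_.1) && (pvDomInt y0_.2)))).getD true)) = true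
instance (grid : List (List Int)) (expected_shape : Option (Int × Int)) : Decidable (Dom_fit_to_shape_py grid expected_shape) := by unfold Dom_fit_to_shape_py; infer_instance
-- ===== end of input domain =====

-- B drops A's dead mode-color pre-fill and per-cell double loop; each output row is built by
-- list repetition + truncation in a single loop over target rows (objective: simpler).

-- ===== PORT A =====
-- _is_rectangular_grid; the isinstance checks are always true on List (List Int) and drop out.
def pvIsRectA (grid : List (List Int)) : Bool :=
  match grid with
  | [] => false
  | first :: _ =>
    if first.length = 0 then false
    else grid.all (fun row => row.length == first.length)

-- _mode_color: Counter built by the nested loop (int(cell) = cell on Int; the except branch is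
-- unreachable), then most_common(1)[0][0] = head of the items sorted by count, descending, stable.
def pvModeColorA (grid : List (List Int)) : Int :=
  let freq : PySem.Dict Int Int :=
    grid.foldl (fun d row => row.foldl (fun d cell => d.modify cell 0 (· + 1)) d) PySem.Dict.empty
  match PySem.List.sorted freq.items (fun p => p.2) true with
  | [] => 0
  | p :: _ => p.1

def fit_to_shape_py (grid : List (List Int)) (expected_shape : Option (Int × Int)) : List (List Int) :=
  match expected_shape with
  | none => grid
  | some (th, tw) =>
    if th ≤ 0 ∨ tw ≤ 0 ∨ ¬ pvIsRectA grid then grid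
    else
      let gh : Int := grid.length
      let gw : Int := (PySem.List.pyGetD grid 0 []).length
      if gh = th ∧ gw = tw then grid
      else
        let bg := pvModeColorA grid
        let resized := (PySem.List.pyRange 0 th 1).map (fun _ => (PySem.List.pyRange 0 tw 1).map (fun _ => bg))
        -- resized[r][c] = v ported as modify r / set c; r and c come from range(th)/range(tw)
        -- and are in bounds, the grid lookups via pyGetD are exact there (mod of a positive divisor).
        (PySem.List.pyRange 0 th 1).foldl (fun res r =>
          (PySem.List.pyRange 0 tw 1).foldl (fun res c =>
            res.modify r.toNat (fun rowv =>
              rowv.set c.toNat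
                (PySem.List.pyGetD (PySem.List.pyGetD grid (PySem.Int.mod r gh) []) (PySem.Int.mod c gw) 0))) res)
          resized

-- ===== PORT B =====
def fit_to_shape_py_alt (grid : List (List Int)) (expected_shape : Option (Int × Int)) : List (List Int) :=
  match expected_shape with
  | none => grid
  | some (th, tw) =>
    if th ≤ 0 ∨ tw ≤ 0 then grid
    else
      match grid with
      | [] => grid
      | first :: _ =>
        let gw : Int := first.length
        if gw = 0 ∨ grid.any (fun row => (row.length : Int) ≠ gw) then grid
        else
          let gh : Int := grid.length
          if gh = th ∧ gw = tw then grid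
          else
            let reps : Int := -(PySem.Int.floordiv (-tw) gw)   -- -(-tw // gw)
            (PySem.List.pyRange 0 th 1).map (fun r =>
              -- (grid[r % gh] * reps)[:tw] : list repetition then slice
              PySem.List.slice
                ((List.replicate reps.toNat (PySem.List.pyGetD grid (PySem.Int.mod r gh) [])).flatten)
                none (some tw))

-- ===== PRECONDITION & SPEC =====
def Spec_fit_to_shape_py (grid : List (List Int)) (expected_shape : Option (Int × Int)) (out : List (List Int)) : Prop := out = fit_to_shape_py_alt grid expected_shape
instance (grid : List (List Int)) (expected_shape : Option (Int × Int)) (out : List (List Int)) : Decidable (Spec_fit_to_shape_py grid expected_shape out) := by unfold Spec_fit_to_shape_py; infer_instance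

-- ===== CLAIM (what is proved, stated in full; the proofs are below) =====
def Claim_equal_fit_to_shape_py : Prop := ∀ (grid : List (List Int)) (expected_shape : Option (Int × Int)), Dom_fit_to_shape_py grid expected_shape → Spec_fit_to_shape_py grid expected_shape (fit_to_shape_py grid expected_shape)

-- ===== LEMMAS AND PROOFS =====

lemma pv_modify_append {β : Type} (f : β → β) :
    ∀ (l₁ : List β) (n : Nat) (l₂ : List β), l₁.length ≤ n →
      (l₁ ++ l₂).modify n f = l₁ ++ l₂.modify (n - l₁.length) f := by
  intro l₁
  induction l₁ with
  | nil => simp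
  | cons x t ih =>
    intro n l₂ h
    obtain ⟨m, rfl⟩ : ∃ m, n = m + 1 := ⟨n - 1, by simp only [List.length_cons] at h; omega⟩
    simp only [List.cons_append, List.modify_succ_cons, List.length_cons]
    rw [ih m l₂ (by simp at h; omega)]
    have hidx : m + 1 - (t.length + 1) = m - t.length := by omega
    rw [hidx]

lemma pv_foldl_set {α : Type} (f : Nat → α) :
    ∀ (W : Nat) (row : List α), W ≤ row.length →
      (List.range W).foldl (fun r c => r.set c (f c)) row
        = (List.range W).map f ++ row.drop W := by
  intro W
  induction W with
  | zero => simp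
  | succ n ih =>
    intro row h
    rw [List.range_succ, List.foldl_append, ih row (by omega), List.foldl_cons, List.foldl_nil,
        List.set_append_right _ _ (by simp)]
    simp only [List.length_map, List.length_range, Nat.sub_self]
    rw [List.drop_eq_getElem_cons (show n < row.length by omega), List.set_cons_zero]
    simp

lemma pv_foldl_modify {β : Type} (u : Nat → β → β) :
    ∀ (H : Nat) (g : List β), H ≤ g.length →
      (List.range H).foldl (fun g r => g.modify r (u r)) g
        = (g.take H).mapIdx u ++ g.drop H := by
  intro H
  induction H with
  | zero => simp
  | succ n ih =>
    intro g h
    have hn : n < g.length := by omega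
    have hlen : ((g.take n).mapIdx u).length = n := by simp; omega
    rw [List.range_succ, List.foldl_append, ih g (by omega), List.foldl_cons, List.foldl_nil,
        pv_modify_append _ _ _ _ (by omega), hlen, Nat.sub_self,
        List.drop_eq_getElem_cons hn, List.modify_zero_cons]
    have htake : g.take (n+1) = g.take n ++ [g[n]] := by
      rw [List.take_add_one, List.getElem?_eq_getElem hn]; rfl
    rw [htake, List.mapIdx_concat]
    simp [Nat.min_eq_left (by omega : n ≤ g.length)]

lemma pv_getElem?_flatten_replicate {α : Type} (src : List α) :
    ∀ (R i : Nat), i < R * src.length →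
      (List.replicate R src).flatten[i]? = src[i % src.length]? := by
  intro R
  induction R with
  | zero => omega
  | succ n ih =>
    intro i h
    rw [List.replicate_succ, List.flatten_cons]
    by_cases hi : i < src.length
    · rw [List.getElem?_append_left hi, Nat.mod_eq_of_lt hi]
    · rw [Nat.not_lt] at hi
      have hmul : (n + 1) * src.length = n * src.length + src.length := by ring
      rw [List.getElem?_append_right hi, ih (i - src.length) (by omega)]
      congr 1
      conv_rhs => rw [show i = src.length + (i - src.length) by omega]
      rw [Nat.add_mod_left]


lemma pv_modify_modify {β : Type} (l : List β) (n : Nat) (f g : β → β) :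
    (l.modify n f).modify n g = l.modify n (fun x => g (f x)) := by
  apply List.ext_getElem (by simp)
  intro i h1 h2
  rw [List.getElem_modify, List.getElem_modify, List.getElem_modify]
  split <;> simp_all

lemma pv_foldl_modify_same {β : Type} (idx : Nat) (step : Nat → β → β) :
    ∀ (l : List Nat) (g : List β),
      l.foldl (fun g c => g.modify idx (step c)) g
        = g.modify idx (fun x => l.foldl (fun x c => step c x) x) := by
  intro l
  induction l with
  | nil =>
    intro g
    apply List.ext_getElem (by simp)
    intro i h1 h2
    rw [List.getElem_modify]
    split <;> simp_all
  | cons c t ih =>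
    intro g
    rw [List.foldl_cons, ih, pv_modify_modify]
    simp only [List.foldl_cons]

lemma pv_row_eq {α : Type} (src : List α) (d : α) (W R : Nat) (hlen : 0 < src.length)
    (hWR : W ≤ R * src.length) :
    ((List.replicate R src).flatten).take W
      = (List.range W).map (fun c => src.getD (c % src.length) d) := by
  apply List.ext_getElem?
  intro i
  by_cases hi : i < W
  · have h1 : i < (List.replicate R src).flatten.length := by
      simp [List.length_flatten]
      calc i < W := hi
        _ ≤ R * src.length := hWR
    rw [List.getElem?_take_of_lt hi, pv_getElem?_flatten_replicate src R i (by omega),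
        List.getElem?_map, List.getElem?_range hi]
    have hm : i % src.length < src.length := Nat.mod_lt _ hlen
    rw [List.getElem?_eq_getElem hm]
    simp [List.getElem?_eq_getElem hm]
  · rw [List.getElem?_eq_none (by simp; omega), List.getElem?_eq_none (by simp; omega)]


-- ===== VERDICT (by name: the statement is the Claim_ definition above) =====

lemma pv_ceil_mul_ge (tw : Int) (gw' : Nat) (htw : 0 < tw) (hgw : 0 < gw') :
    tw.toNat ≤ (-PySem.Int.floordiv (-tw) (gw' : Int)).toNat * gw' := by
  have hb : (0 : Int) < (gw' : Int) := by exact_mod_cast hgw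
  have hd := PySem.Int.floordiv_mul_add_mod (-tw) (gw' : Int)
  have hm0 := PySem.Int.mod_nonneg (-tw) hb
  have hml := PySem.Int.mod_lt (-tw) hb
  set k := PySem.Int.floordiv (-tw) (gw' : Int) with hk
  have hkneg : k < 0 := by
    by_contra hge
    rw [Int.not_lt] at hge
    have : (0 : Int) ≤ k * (gw' : Int) := mul_nonneg hge hb.le
    linarith
  have hineq : tw ≤ (-k) * (gw' : Int) := by nlinarith
  have h1 : ((tw.toNat : Int)) = tw := Int.toNat_of_nonneg htw.le
  have h2 : (((-k).toNat : Int)) = -k := Int.toNat_of_nonneg (by omega)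
  have : ((tw.toNat : Int)) ≤ (((-k).toNat * gw' : Nat) : Int) := by
    push_cast
    rw [h1, h2]
    exact hineq
  exact_mod_cast this

lemma pv_main (bg : Int) (g : List (List Int)) (th tw : Int) (gw' : Nat)
    (hgl : 0 < g.length) (hgw : 0 < gw') (hall : ∀ row ∈ g, row.length = gw')
    (hth : 0 < th) (htw : 0 < tw) :
    List.foldl
      (fun res r =>
        List.foldl
          (fun res c =>
            res.modify r.toNat fun rowv =>
              rowv.set c.toNat
                (PySem.List.pyGetD (PySem.List.pyGetD g (PySem.Int.mod r (g.length : Int)) [])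
                  (PySem.Int.mod c (gw' : Int)) 0))
          res (PySem.List.pyRange 0 tw 1))
      (List.map (fun _ => List.map (fun _ => bg) (PySem.List.pyRange 0 tw 1))
        (PySem.List.pyRange 0 th 1))
      (PySem.List.pyRange 0 th 1) =
    List.map
      (fun r =>
        PySem.List.slice
          (List.replicate (-PySem.Int.floordiv (-tw) (gw' : Int)).toNat
              (PySem.List.pyGetD g (PySem.Int.mod r (g.length : Int)) [])).flatten
          none (some tw))
      (PySem.List.pyRange 0 th 1) := by
  have hWR := pv_ceil_mul_ge tw gw' htw hgw
  rw [PySem.List.pyRange_zero th, PySem.List.pyRange_zero tw]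
  simp only [List.foldl_map, List.map_map, Function.comp_def, Int.toNat_natCast]
  simp only [pv_foldl_modify_same]
  rw [pv_foldl_modify _ th.toNat _ (by simp)]
  rw [List.take_of_length_le (by simp), List.drop_of_length_le (by simp), List.append_nil]
  apply List.ext_getElem (by simp)
  intro i h1 h2
  simp only [List.getElem_mapIdx, List.getElem_map, List.getElem_range]
  have hmlt : i % g.length < g.length := Nat.mod_lt _ hgl
  rw [PySem.Int.mod_natCast i g.length, PySem.List.pyGetD_natCast,
      List.getD_eq_getElem g [] hmlt]
  have hsl : (g[i % g.length]).length = gw' := hall _ (List.getElem_mem hmlt)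
  rw [pv_foldl_set _ tw.toNat _ (by simp)]
  rw [List.drop_of_length_le (by simp), List.append_nil]
  rw [PySem.List.slice_to _ htw.le]
  rw [pv_row_eq g[i % g.length] 0 tw.toNat _ (by omega) (by rw [hsl]; exact hWR)]
  apply List.map_congr_left
  intro c hc
  rw [List.mem_range] at hc
  rw [PySem.Int.mod_natCast c gw', PySem.List.pyGetD_natCast, hsl]

theorem fit_to_shape_py_spec : Claim_equal_fit_to_shape_py := by
  intro grid es _
  unfold Spec_fit_to_shape_py
  cases es with
  | none => rfl
  | some p =>
    obtain ⟨th, tw⟩ := p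
    cases grid with
    | nil =>
      simp only [fit_to_shape_py, fit_to_shape_py_alt]
      rw [if_pos (by right; right; simp [pvIsRectA])]
      split <;> rfl
    | cons first rest =>
      simp only [fit_to_shape_py, fit_to_shape_py_alt]
      by_cases h1 : th ≤ 0 ∨ tw ≤ 0
      · rw [if_pos (by tauto), if_pos h1]
      · rw [not_or] at h1
        obtain ⟨hth', htw'⟩ := h1
        rw [Int.not_le] at hth' htw'
        by_cases h2 : first.length = 0 ∨ ∃ row ∈ first :: rest, row.length ≠ first.length
        · have hArect : pvIsRectA (first :: rest) = false := by
            simp only [pvIsRectA]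
            split
            · rfl
            · rename_i hz
              rcases h2 with h2 | ⟨row, hmem, hne⟩
              · exact absurd h2 hz
              · rw [List.all_eq_false]
                exact ⟨row, hmem, by simpa using hne⟩
          rw [if_pos (by right; right; simp [hArect]),
             if_neg (by rw [not_or, Int.not_le, Int.not_le]; exact ⟨hth', htw'⟩),
             if_pos (show (first.length : Int) = 0 ∨ _ from by
               rcases h2 with h2 | ⟨row, hmem, hne⟩
               · left; exact_mod_cast congrArg (fun n : Nat => (n : Int)) h2
               · right
                 simp only [List.any_eq_true]
                 exact ⟨row, hmem, decide_eq_true (by exact_mod_cast hne)⟩)]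
        · rw [not_or] at h2
          obtain ⟨hw0, hall⟩ := h2
          rw [not_exists] at hall
          have hall' : ∀ row ∈ first :: rest, row.length = first.length := by
            intro row hmem
            by_contra hne
            exact hall row (by simp [hmem, hne])
          have hrect : pvIsRectA (first :: rest) = true := by
            simp only [pvIsRectA, if_neg hw0, List.all_eq_true]
            intro row hmem
            simp [hall' row hmem]
          have hA : ¬(th ≤ 0 ∨ tw ≤ 0 ∨ ¬pvIsRectA (first :: rest) = true) := by
            rw [not_or, not_or]
            exact ⟨Int.not_le.mpr hth', Int.not_le.mpr htw', by simp [hrect]⟩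
          have hB1 : ¬(th ≤ 0 ∨ tw ≤ 0) := by
            rw [not_or]
            exact ⟨Int.not_le.mpr hth', Int.not_le.mpr htw'⟩
          have hB2 : ¬((first.length : Int) = 0 ∨
              ((first :: rest).any fun row => decide (¬(row.length : Int) = (first.length : Int))) = true) := by
            rw [not_or]
            refine ⟨by exact_mod_cast hw0, ?_⟩
            simp only [List.any_eq_true, not_exists]
            intro row hc
            obtain ⟨hm, hd⟩ := hc
            rw [decide_eq_true_iff] at hd
            exact hd (by exact_mod_cast hall' row hm)
          rw [if_neg hA, if_neg hB1, if_neg hB2, PySem.List.pyGetD_zero_cons]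
          by_cases h3 : ((first :: rest).length : Int) = th ∧ (first.length : Int) = tw
          · rw [if_pos h3, if_pos h3]
          · rw [if_neg h3, if_neg h3]
            exact pv_main (pvModeColorA (first :: rest)) (first :: rest) th tw first.length
              (by simp) (Nat.pos_of_ne_zero hw0) hall' hth' htw'
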